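-- pv_equiv track=rewrite | github.com/Hiep234/Laptop | CSCV/scoring.py | _get_cpu_tier
-- ===== SOURCE A (Python) =====
-- CPU_TIERS = {
--     # Intel - sorted by performance tier (higher = more powerful)
--     "i9-14": 100, "i9-13": 95, "i9-12": 88,
--     "i7-14": 85, "i7-13": 80, "i7-12": 73,
--     "core ultra 9": 98, "core ultra 7": 82, "core ultra 5": 68,
--     "i5-14": 65, "i5-13": 62, "i5-12": 55,
--     "i3-14": 40, "i3-13": 38, "i3-12": 35,
--     # AMD
--     "ryzen 9 7": 96, "ryzen 9 6": 90, "ryzen 9 5": 85,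
--     "ryzen 7 7": 78, "ryzen 7 6": 72, "ryzen 7 5": 67,
--     "ryzen 5 7": 60, "ryzen 5 6": 55, "ryzen 5 5": 50,
--     "ryzen 3": 35,
--     # Apple
--     "m4 pro": 95, "m4 max": 100, "m4": 85,
--     "m3 pro": 88, "m3 max": 95, "m3": 78,
--     "m2 pro": 80, "m2 max": 88, "m2": 70,
--     "m1 pro": 72, "m1 max": 80, "m1": 62,
--     # Snapdragon
--     "snapdragon x elite": 82, "snapdragon x plus": 68,
--     # Generic fallbacks
--     "i9": 88, "i7": 75, "i5": 58, "i3": 35,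
--     "ryzen 9": 88, "ryzen 7": 72, "ryzen 5": 55,
-- }
--
-- def _get_cpu_tier(cpu_str: str) -> int:
--     """Get CPU performance tier score (0-100)."""
--     if not cpu_str:
--         return 0
--     cpu_low = cpu_str.lower()
--     # Try specific matches first (longer = more specific)
--     for key in sorted(CPU_TIERS.keys(), key=len, reverse=True):
--         if key in cpu_low:
--             return CPU_TIERS[key]
--     return 20  # fallback for unknown CPUs
-- ===== SOURCE B (Python) =====
-- # Tier data kept as a plain text table (parsed once at import), and the lookup
-- # done by a position-driven prefix scan instead of sorting keys per call.
-- _SPEC = """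
-- i9-14:100
-- i9-13:95
-- i9-12:88
-- i7-14:85
-- i7-13:80
-- i7-12:73
-- core ultra 9:98
-- core ultra 7:82
-- core ultra 5:68
-- i5-14:65
-- i5-13:62
-- i5-12:55
-- i3-14:40
-- i3-13:38
-- i3-12:35
-- ryzen 9 7:96
-- ryzen 9 6:90
-- ryzen 9 5:85
-- ryzen 7 7:78
-- ryzen 7 6:72
-- ryzen 7 5:67
-- ryzen 5 7:60
-- ryzen 5 6:55
-- ryzen 5 5:50
-- ryzen 3:35
-- m4 pro:95
-- m4 max:100
-- m4:85
-- m3 pro:88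
-- m3 max:95
-- m3:78
-- m2 pro:80
-- m2 max:88
-- m2:70
-- m1 pro:72
-- m1 max:80
-- m1:62
-- snapdragon x elite:82
-- snapdragon x plus:68
-- i9:88
-- i7:75
-- i5:58
-- i3:35
-- ryzen 9:88
-- ryzen 7:72
-- ryzen 5:55
-- """
--
-- _TIERS = []
-- for _line in _SPEC.strip().splitlines():
--     _k, _v = _line.split(":")
--     _TIERS.append((_k, int(_v)))
--
--
-- def _better(best, cand):
--     # cand wins when its key is longer, or equally long but earlier in the table
--     if best is None or cand[0] > best[0] or (cand[0] == best[0] and cand[1] < best[1]):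
--         return cand
--     return best
--
--
-- def _get_cpu_tier(cpu_str: str) -> int:
--     """Get CPU performance tier score (0-100)."""
--     if not cpu_str:
--         return 0
--     s = cpu_str.lower()
--     best = None  # (key length, table index, score) of the best match seen
--     for i in range(len(s)):
--         for j, (key, val) in enumerate(_TIERS):
--             if s.startswith(key, i):
--                 best = _better(best, (len(key), j, val))
--     return best[2] if best is not None else 20
-- ===== Notes on version B (the rewrite author's own statement) =====
-- stated objective: alternative
-- what changed: B stores the tier data as a text table parsed once at import and replaces A's per-call sort-keys-by-length-then-first-substring-match with a position-driven scan: for every position of the lowercased string it prefix-tests the table rows and keeps the best candidate (longest key, earliest row on equal length), which is exactly A's stable-sort tie-break.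
import Mathlib
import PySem

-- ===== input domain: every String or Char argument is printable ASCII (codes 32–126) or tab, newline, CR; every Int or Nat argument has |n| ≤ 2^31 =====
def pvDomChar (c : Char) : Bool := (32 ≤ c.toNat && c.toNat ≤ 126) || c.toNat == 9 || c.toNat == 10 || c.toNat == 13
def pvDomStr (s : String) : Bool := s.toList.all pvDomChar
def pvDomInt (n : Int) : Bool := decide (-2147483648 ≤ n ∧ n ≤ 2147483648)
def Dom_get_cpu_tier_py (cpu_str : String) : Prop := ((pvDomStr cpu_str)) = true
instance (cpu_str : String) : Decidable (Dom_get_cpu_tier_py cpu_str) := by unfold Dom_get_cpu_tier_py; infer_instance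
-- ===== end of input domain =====

-- B keeps the tier data as a text table parsed once and finds the best match by scanning the
-- string's positions with prefix tests (best = longest key, earliest table row on ties),
-- instead of A's per-call sort of the keys and first-substring-match scan; objective: alternative.

-- ===== PORT A =====
def CPU_TIERS : PySem.Dict String Int := PySem.Dict.ofList
  [("i9-14", 100), ("i9-13", 95), ("i9-12", 88),
   ("i7-14", 85), ("i7-13", 80), ("i7-12", 73),
   ("core ultra 9", 98), ("core ultra 7", 82), ("core ultra 5", 68),
   ("i5-14", 65), ("i5-13", 62), ("i5-12", 55),
   ("i3-14", 40), ("i3-13", 38), ("i3-12", 35),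
   ("ryzen 9 7", 96), ("ryzen 9 6", 90), ("ryzen 9 5", 85),
   ("ryzen 7 7", 78), ("ryzen 7 6", 72), ("ryzen 7 5", 67),
   ("ryzen 5 7", 60), ("ryzen 5 6", 55), ("ryzen 5 5", 50),
   ("ryzen 3", 35),
   ("m4 pro", 95), ("m4 max", 100), ("m4", 85),
   ("m3 pro", 88), ("m3 max", 95), ("m3", 78),
   ("m2 pro", 80), ("m2 max", 88), ("m2", 70),
   ("m1 pro", 72), ("m1 max", 80), ("m1", 62),
   ("snapdragon x elite", 82), ("snapdragon x plus", 68),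
   ("i9", 88), ("i7", 75), ("i5", 58), ("i3", 35),
   ("ryzen 9", 88), ("ryzen 7", 72), ("ryzen 5", 55)]

-- the 'for key in …: if key in cpu_low: return CPU_TIERS[key]' loop
-- (the CPU_TIERS[key] lookup cannot raise: key comes from CPU_TIERS.keys())
def aLoop (cpu_low : String) : List String → Int
  | [] => 20
  | k :: ks => if PySem.Str.isIn k cpu_low then PySem.Dict.getD CPU_TIERS k 0 else aLoop cpu_low ks

def get_cpu_tier_py (cpu_str : String) : Int :=
  if cpu_str = "" then 0
  else
    let cpu_low := PySem.Str.lower cpu_str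
    aLoop cpu_low (PySem.List.sorted (PySem.Dict.keys CPU_TIERS) PySem.Str.len true)

-- ===== PORT B =====
-- Source B's _SPEC text table, verbatim (one entry per line, "key:score")
def TIER_SPEC : String := "\ni9-14:100\ni9-13:95\ni9-12:88\ni7-14:85\ni7-13:80\ni7-12:73\ncore ultra 9:98\ncore ultra 7:82\ncore ultra 5:68\ni5-14:65\ni5-13:62\ni5-12:55\ni3-14:40\ni3-13:38\ni3-12:35\nryzen 9 7:96\nryzen 9 6:90\nryzen 9 5:85\nryzen 7 7:78\nryzen 7 6:72\nryzen 7 5:67\nryzen 5 7:60\nryzen 5 6:55\nryzen 5 5:50\nryzen 3:35\nm4 pro:95\nm4 max:100\nm4:85\nm3 pro:88\nm3 max:95\nm3:78\nm2 pro:80\nm2 max:88\nm2:70\nm1 pro:72\nm1 max:80\nm1:62\nsnapdragon x elite:82\nsnapdragon x plus:68\ni9:88\ni7:75\ni5:58\ni3:35\nryzen 9:88\nryzen 7:72\nryzen 5:55\n"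

-- one line of the table: '_k, _v = _line.split(":")' then int(_v); every line of the fixed
-- TIER_SPEC has exactly one ':' and a decimal score, so the fallbacks are never taken there
def parse_tier_line (line : String) : String × Int :=
  match PySem.Str.split? line ":" with
  | some [k, v] => (k, (PySem.Int.ofStr? v).getD 0)
  | _ => ("", 0)

-- the module-level parsing loop building _TIERS
def TIER_TABLE : List (String × Int) :=
  (PySem.Str.splitlines (PySem.Str.strip TIER_SPEC)).map parse_tier_line

-- Source B's _better: cand = (key length, table index, score) wins when longer, or equally long but earlier
def better_cand (best : Option (Int × Int × Int)) (cand : Int × Int × Int) : Option (Int × Int × Int) :=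
  match best with
  | none => some cand
  | some p => if cand.1 > p.1 ∨ (cand.1 = p.1 ∧ cand.2.1 < p.2.1) then some cand else some p

-- 's.startswith(key, i)' with 0 ≤ i is a prefix test on s[i:], i.e. on (toList s).drop i
def get_cpu_tier_py_alt (cpu_str : String) : Int :=
  if cpu_str = "" then 0
  else
    let s := (PySem.Str.lower cpu_str).toList
    let best := (List.range s.length).foldl
      (fun b i =>
        (PySem.List.enumerate TIER_TABLE 0).foldl
          (fun b e =>
            if PySem.Chars.startswith (List.drop i s) e.2.1.toList
            then better_cand b (PySem.Str.len e.2.1, e.1, e.2.2)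
            else b) b)
      (none : Option (Int × Int × Int))
    match best with
    | some c => c.2.2
    | none => 20

-- ===== PRECONDITION & SPEC =====
def Spec_get_cpu_tier_py (cpu_str : String) (out : Int) : Prop := out = get_cpu_tier_py_alt cpu_str
instance (cpu_str : String) (out : Int) : Decidable (Spec_get_cpu_tier_py cpu_str out) := by unfold Spec_get_cpu_tier_py; infer_instance

-- ===== CLAIM (what is proved, stated in full; the proofs are below) =====
def Claim_equal_get_cpu_tier_py : Prop := ∀ (cpu_str : String), Dom_get_cpu_tier_py cpu_str → Spec_get_cpu_tier_py cpu_str (get_cpu_tier_py cpu_str)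

-- ===== LEMMAS AND PROOFS =====

-- 'strictly better candidate' order of Source B: longer key, or same length and smaller table index
def cLt (c p : Int × Int × Int) : Prop := p.1 < c.1 ∨ (c.1 = p.1 ∧ c.2.1 < p.2.1)

theorem cLt_irrefl (c : Int × Int × Int) : ¬ cLt c c := by unfold cLt; omega

theorem cLt_trans {a b c : Int × Int × Int} (h1 : cLt a b) (h2 : cLt b c) : cLt a c := by
  unfold cLt at *; omega

-- a fold of better_cand over a plain candidate list (the proof's view of B's nested loops)
def minCand (b : Option (Int × Int × Int)) : List (Int × Int × Int) → Option (Int × Int × Int)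
  | [] => b
  | c :: L => minCand (better_cand b c) L

theorem better_cand_isSome (b : Option (Int × Int × Int)) (c : Int × Int × Int) :
    ∃ q, better_cand b c = some q := by
  cases b with
  | none => exact ⟨c, rfl⟩
  | some p =>
      unfold better_cand
      by_cases h : c.1 > p.1 ∨ (c.1 = p.1 ∧ c.2.1 < p.2.1)
      · exact ⟨c, if_pos h⟩
      · exact ⟨p, if_neg h⟩

theorem better_cand_cases (b : Option (Int × Int × Int)) (c : Int × Int × Int) :
    better_cand b c = some c ∨ (∃ p, b = some p ∧ better_cand b c = some p ∧ ¬ cLt c p) := by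
  cases b with
  | none => exact Or.inl rfl
  | some p =>
      unfold better_cand
      by_cases h : c.1 > p.1 ∨ (c.1 = p.1 ∧ c.2.1 < p.2.1)
      · exact Or.inl (if_pos h)
      · exact Or.inr ⟨p, rfl, if_neg h, by unfold cLt; omega⟩

theorem minCand_none_eq (L : List (Int × Int × Int)) (b : Option (Int × Int × Int))
    (h : minCand b L = none) : b = none ∧ L = [] := by
  induction L generalizing b with
  | nil => exact ⟨h, rfl⟩
  | cons c L ih =>
      obtain ⟨hb, -⟩ := ih (better_cand b c) h
      obtain ⟨q, hq⟩ := better_cand_isSome b c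
      rw [hq] at hb; cases hb

theorem minCand_mem (L : List (Int × Int × Int)) (b : Option (Int × Int × Int))
    (c : Int × Int × Int) (h : minCand b L = some c) : b = some c ∨ c ∈ L := by
  induction L generalizing b with
  | nil => exact Or.inl h
  | cons x L ih =>
      rcases ih (better_cand b x) h with h' | h'
      · rcases better_cand_cases b x with hx | ⟨p, hp, hx, -⟩
        · rw [hx] at h'; cases h'; exact Or.inr List.mem_cons_self
        · rw [hx] at h'; cases h'; exact Or.inl hp
      · exact Or.inr (List.mem_cons_of_mem _ h')

-- the final best is never strictly worse than any intermediate best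
theorem minCand_mono (L : List (Int × Int × Int)) :
    ∀ (b : Option (Int × Int × Int)) (c : Int × Int × Int),
      minCand b L = some c → ∀ p, b = some p → c = p ∨ cLt c p := by
  induction L with
  | nil => intro b c h p hb; rw [hb] at h; cases h; exact Or.inl rfl
  | cons x L ih =>
      intro b c h p hb
      subst hb
      simp only [minCand] at h
      by_cases ht : x.1 > p.1 ∨ (x.1 = p.1 ∧ x.2.1 < p.2.1)
      · rw [show better_cand (some p) x = some x from by
            show (if x.1 > p.1 ∨ (x.1 = p.1 ∧ x.2.1 < p.2.1) then some x else some p) = some x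
            rw [if_pos ht]] at h
        rcases ih _ c h x rfl with rfl | h'
        · exact Or.inr (by unfold cLt; omega)
        · exact Or.inr (cLt_trans h' (by unfold cLt; omega))
      · rw [show better_cand (some p) x = some p from by
            show (if x.1 > p.1 ∨ (x.1 = p.1 ∧ x.2.1 < p.2.1) then some x else some p) = some p
            rw [if_neg ht]] at h
        exact ih _ c h p rfl

-- no candidate of the list strictly beats the final best
theorem minCand_min (L : List (Int × Int × Int)) :
    ∀ (b : Option (Int × Int × Int)) (c : Int × Int × Int),
      minCand b L = some c → ∀ d ∈ L, ¬ cLt d c := by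
  induction L with
  | nil => intro b c h d hd; cases hd
  | cons x L ih =>
      intro b c h d hd
      simp only [minCand] at h
      rcases List.mem_cons.mp hd with rfl | hd
      · rcases better_cand_cases b d with hx | ⟨p, -, hx, hnlt⟩
        · rcases minCand_mono L _ c (hx ▸ h) d rfl with rfl | h'
          · exact cLt_irrefl c
          · exact fun hc => cLt_irrefl c (cLt_trans h' hc)
        · rcases minCand_mono L _ c (hx ▸ h) p rfl with rfl | h'
          · exact hnlt
          · exact fun hc => hnlt (cLt_trans hc h')
      · exact ih _ c h d hd

-- B's conditional inner loop is minCand over the filtered, mapped candidates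
theorem foldl_if_eq_minCand (s : List Char) (i : Nat)
    (E : List (Int × (String × Int))) (b : Option (Int × Int × Int)) :
    E.foldl (fun b e =>
        if PySem.Chars.startswith (List.drop i s) e.2.1.toList
        then better_cand b (PySem.Str.len e.2.1, e.1, e.2.2)
        else b) b
      = minCand b ((E.filter (fun e => PySem.Chars.startswith (List.drop i s) e.2.1.toList)).map
          (fun e => (PySem.Str.len e.2.1, e.1, e.2.2))) := by
  induction E generalizing b with
  | nil => rfl
  | cons e E ih =>
      simp only [List.foldl_cons, List.filter_cons]
      cases h : PySem.Chars.startswith (List.drop i s) e.2.1.toList with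
      | true => simp only [if_true, List.map_cons, minCand, ih]
      | false => simp only [Bool.false_eq_true, if_false, ih]

theorem minCand_append (b : Option (Int × Int × Int)) (L1 L2 : List (Int × Int × Int)) :
    minCand b (L1 ++ L2) = minCand (minCand b L1) L2 := by
  induction L1 generalizing b with
  | nil => rfl
  | cons x L ih => simp only [List.cons_append, minCand, ih]

-- B's outer loop over positions is minCand over the concatenation of all candidate lists
theorem foldl_minCand_flatMap (I : List Nat) (C : Nat → List (Int × Int × Int))
    (b : Option (Int × Int × Int)) :
    I.foldl (fun b i => minCand b (C i)) b = minCand b (I.flatMap C) := by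
  induction I generalizing b with
  | nil => rfl
  | cons i I ih => simp only [List.foldl_cons, List.flatMap_cons, ih, minCand_append]

-- all candidates B's two loops ever offer to better_cand
def candsOf (s : List Char) : List (Int × Int × Int) :=
  (List.range s.length).flatMap (fun i =>
    ((PySem.List.enumerate TIER_TABLE 0).filter
        (fun e => PySem.Chars.startswith (List.drop i s) e.2.1.toList)).map
      (fun e => (PySem.Str.len e.2.1, e.1, e.2.2)))

theorem bfold_eq (s : List Char) :
    (List.range s.length).foldl
        (fun b i =>
          (PySem.List.enumerate TIER_TABLE 0).foldl
            (fun b e =>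
              if PySem.Chars.startswith (List.drop i s) e.2.1.toList
              then better_cand b (PySem.Str.len e.2.1, e.1, e.2.2)
              else b) b)
        (none : Option (Int × Int × Int))
      = minCand none (candsOf s) := by
  unfold candsOf
  rw [← foldl_minCand_flatMap]
  have hfun : (fun (b : Option (Int × Int × Int)) (i : Nat) =>
      (PySem.List.enumerate TIER_TABLE 0).foldl
        (fun b e =>
          if PySem.Chars.startswith (List.drop i s) e.2.1.toList
          then better_cand b (PySem.Str.len e.2.1, e.1, e.2.2)
          else b) b)
    = (fun b i => minCand b
        (((PySem.List.enumerate TIER_TABLE 0).filter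
            (fun e => PySem.Chars.startswith (List.drop i s) e.2.1.toList)).map
          (fun e => (PySem.Str.len e.2.1, e.1, e.2.2)))) := by
    funext b i
    exact foldl_if_eq_minCand s i _ b
  rw [hfun]

-- ---- A-side: the sorted key scan as 'first matching row' of a fixed sorted table ----

-- the enumerated tier table in A's sort order (length descending, table order on ties)
def SORTED_T : List (Int × (String × Int)) :=
  [(37, ("snapdragon x elite", 82)),
   (38, ("snapdragon x plus", 68)),
   (6, ("core ultra 9", 98)),
   (7, ("core ultra 7", 82)),
   (8, ("core ultra 5", 68)),
   (15, ("ryzen 9 7", 96)),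
   (16, ("ryzen 9 6", 90)),
   (17, ("ryzen 9 5", 85)),
   (18, ("ryzen 7 7", 78)),
   (19, ("ryzen 7 6", 72)),
   (20, ("ryzen 7 5", 67)),
   (21, ("ryzen 5 7", 60)),
   (22, ("ryzen 5 6", 55)),
   (23, ("ryzen 5 5", 50)),
   (24, ("ryzen 3", 35)),
   (43, ("ryzen 9", 88)),
   (44, ("ryzen 7", 72)),
   (45, ("ryzen 5", 55)),
   (25, ("m4 pro", 95)),
   (26, ("m4 max", 100)),
   (28, ("m3 pro", 88)),
   (29, ("m3 max", 95)),
   (31, ("m2 pro", 80)),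
   (32, ("m2 max", 88)),
   (34, ("m1 pro", 72)),
   (35, ("m1 max", 80)),
   (0, ("i9-14", 100)),
   (1, ("i9-13", 95)),
   (2, ("i9-12", 88)),
   (3, ("i7-14", 85)),
   (4, ("i7-13", 80)),
   (5, ("i7-12", 73)),
   (9, ("i5-14", 65)),
   (10, ("i5-13", 62)),
   (11, ("i5-12", 55)),
   (12, ("i3-14", 40)),
   (13, ("i3-13", 38)),
   (14, ("i3-12", 35)),
   (27, ("m4", 85)),
   (30, ("m3", 78)),
   (33, ("m2", 70)),
   (36, ("m1", 62)),
   (39, ("i9", 88)),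
   (40, ("i7", 75)),
   (41, ("i5", 58)),
   (42, ("i3", 35))]

def trip (e : Int × (String × Int)) : Int × Int × Int := (PySem.Str.len e.2.1, e.1, e.2.2)

-- first row whose key occurs in cl
def firstE (cl : String) : List (Int × (String × Int)) → Option (Int × (String × Int))
  | [] => none
  | e :: S => if PySem.Str.isIn e.2.1 cl then some e else firstE cl S

set_option maxRecDepth 100000 in
set_option maxHeartbeats 1000000 in
theorem sorted_keys_eq :
    PySem.List.sorted (PySem.Dict.keys CPU_TIERS) PySem.Str.len true
      = SORTED_T.map (fun e => e.2.1) := by decide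

set_option maxRecDepth 100000 in
set_option maxHeartbeats 1000000 in
theorem lookups_eq : ∀ e ∈ SORTED_T, PySem.Dict.getD CPU_TIERS e.2.1 0 = e.2.2 := by decide

set_option maxRecDepth 100000 in
set_option maxHeartbeats 1000000 in
theorem sorted_pairwise_cLt :
    SORTED_T.Pairwise (fun a b => cLt (trip a) (trip b)) := by
  have h : SORTED_T.Pairwise (fun a b =>
      decide ((trip b).1 < (trip a).1 ∨ ((trip a).1 = (trip b).1 ∧ (trip a).2.1 < (trip b).2.1)) = true) := by
    decide
  exact h.imp (fun hb => by unfold cLt; exact of_decide_eq_true hb)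

-- the enumerated parsed table, as a literal (one evaluation of the parse in the kernel)
def ENUM_T : List (Int × (String × Int)) :=
  [(0, ("i9-14", 100)),
   (1, ("i9-13", 95)),
   (2, ("i9-12", 88)),
   (3, ("i7-14", 85)),
   (4, ("i7-13", 80)),
   (5, ("i7-12", 73)),
   (6, ("core ultra 9", 98)),
   (7, ("core ultra 7", 82)),
   (8, ("core ultra 5", 68)),
   (9, ("i5-14", 65)),
   (10, ("i5-13", 62)),
   (11, ("i5-12", 55)),
   (12, ("i3-14", 40)),
   (13, ("i3-13", 38)),
   (14, ("i3-12", 35)),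
   (15, ("ryzen 9 7", 96)),
   (16, ("ryzen 9 6", 90)),
   (17, ("ryzen 9 5", 85)),
   (18, ("ryzen 7 7", 78)),
   (19, ("ryzen 7 6", 72)),
   (20, ("ryzen 7 5", 67)),
   (21, ("ryzen 5 7", 60)),
   (22, ("ryzen 5 6", 55)),
   (23, ("ryzen 5 5", 50)),
   (24, ("ryzen 3", 35)),
   (25, ("m4 pro", 95)),
   (26, ("m4 max", 100)),
   (27, ("m4", 85)),
   (28, ("m3 pro", 88)),
   (29, ("m3 max", 95)),
   (30, ("m3", 78)),
   (31, ("m2 pro", 80)),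
   (32, ("m2 max", 88)),
   (33, ("m2", 70)),
   (34, ("m1 pro", 72)),
   (35, ("m1 max", 80)),
   (36, ("m1", 62)),
   (37, ("snapdragon x elite", 82)),
   (38, ("snapdragon x plus", 68)),
   (39, ("i9", 88)),
   (40, ("i7", 75)),
   (41, ("i5", 58)),
   (42, ("i3", 35)),
   (43, ("ryzen 9", 88)),
   (44, ("ryzen 7", 72)),
   (45, ("ryzen 5", 55))]

set_option maxRecDepth 100000 in
set_option maxHeartbeats 1000000 in
theorem enum_eq : PySem.List.enumerate TIER_TABLE 0 = ENUM_T := by decide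

set_option maxRecDepth 100000 in
set_option maxHeartbeats 1000000 in
theorem enum_sub_sorted : ∀ e ∈ PySem.List.enumerate TIER_TABLE 0, e ∈ SORTED_T := by rw [enum_eq]; decide

set_option maxRecDepth 100000 in
set_option maxHeartbeats 1000000 in
theorem sorted_sub_enum : ∀ e ∈ SORTED_T, e ∈ PySem.List.enumerate TIER_TABLE 0 := by rw [enum_eq]; decide

set_option maxRecDepth 100000 in
set_option maxHeartbeats 1000000 in
theorem keys_ne_nil : ∀ e ∈ SORTED_T, e.2.1.toList ≠ [] := by decide

theorem aLoop_eq_firstE (cl : String) (S : List (Int × (String × Int)))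
    (hmem : ∀ e ∈ S, PySem.Dict.getD CPU_TIERS e.2.1 0 = e.2.2) :
    aLoop cl (S.map (fun e => e.2.1))
      = match firstE cl S with
        | some e => e.2.2
        | none => 20 := by
  induction S with
  | nil => rfl
  | cons e S ih =>
      simp only [List.map_cons, aLoop, firstE]
      by_cases h : PySem.Str.isIn e.2.1 cl = true
      · rw [if_pos h, if_pos h]; exact hmem e List.mem_cons_self
      · rw [if_neg (by simpa using h), if_neg (by simpa using h)]
        exact ih (fun a ha => hmem a (List.mem_cons_of_mem _ ha))

theorem firstE_none (cl : String) (S : List (Int × (String × Int)))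
    (h : firstE cl S = none) : ∀ e ∈ S, ¬ PySem.Str.isIn e.2.1 cl = true := by
  induction S with
  | nil => intro e he; cases he
  | cons x S ih =>
      intro e he
      simp only [firstE] at h
      by_cases hx : PySem.Str.isIn x.2.1 cl = true
      · rw [if_pos hx] at h; cases h
      · rw [if_neg (by simpa using hx)] at h
        rcases List.mem_cons.mp he with rfl | he
        · exact hx
        · exact ih h e he

theorem firstE_some {cl : String} {S : List (Int × (String × Int))}
    {a : Int × (String × Int)}
    (hp : S.Pairwise (fun x y => cLt (trip x) (trip y)))
    (h : firstE cl S = some a) :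
    a ∈ S ∧ PySem.Str.isIn a.2.1 cl = true ∧
      ∀ e ∈ S, PySem.Str.isIn e.2.1 cl = true → e = a ∨ cLt (trip a) (trip e) := by
  induction S with
  | nil => cases h
  | cons x S ih =>
      rcases List.pairwise_cons.mp hp with ⟨hx, hS⟩
      simp only [firstE] at h
      by_cases hm : PySem.Str.isIn x.2.1 cl = true
      · rw [if_pos hm] at h; cases h
        refine ⟨List.mem_cons_self, hm, ?_⟩
        intro e he _
        rcases List.mem_cons.mp he with rfl | he
        · exact Or.inl rfl
        · exact Or.inr (hx e he)
      · rw [if_neg (by simpa using hm)] at h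
        obtain ⟨ha, hin, hmin⟩ := ih hS h
        refine ⟨List.mem_cons_of_mem _ ha, hin, ?_⟩
        intro e he hie
        rcases List.mem_cons.mp he with rfl | he
        · exact absurd hie hm
        · exact hmin e he hie

-- occurrence as substring ↔ a prefix at some position i < length
theorem mem_candsOf_iff (s : List Char) (c : Int × Int × Int) :
    c ∈ candsOf s
      ↔ ∃ e ∈ PySem.List.enumerate TIER_TABLE 0,
          c = trip e ∧ PySem.Chars.isIn e.2.1.toList s = true := by
  unfold candsOf
  constructor
  · intro hc
    rcases List.mem_flatMap.mp hc with ⟨i, hi, hc⟩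
    rcases List.mem_map.mp hc with ⟨e, he, rfl⟩
    rcases List.mem_filter.mp he with ⟨heE, hstart⟩
    refine ⟨e, heE, rfl, ?_⟩
    exact (PySem.Chars.exists_prefix_drop_iff_isIn _ _).mp
      ⟨i, (PySem.Chars.startswith_iff _ _).mp hstart⟩
  · rintro ⟨e, heE, rfl, hin⟩
    rcases (PySem.Chars.exists_prefix_drop_iff_isIn _ _).mpr hin with ⟨j, hj⟩
    have hkey : e.2.1.toList ≠ [] := keys_ne_nil e (enum_sub_sorted e heE)
    have hjlt : j < s.length := by
      by_contra hge
      have hdrop : List.drop j s = [] := List.drop_eq_nil_of_le (by omega)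
      rw [hdrop] at hj
      exact hkey (List.prefix_nil.mp hj)
    refine List.mem_flatMap.mpr ⟨j, List.mem_range.mpr hjlt, ?_⟩
    exact List.mem_map.mpr ⟨e, List.mem_filter.mpr
      ⟨heE, (PySem.Chars.startswith_iff _ _).mpr hj⟩, rfl⟩

-- ===== VERDICT (by name: the statement is the Claim_ definition above) =====
theorem get_cpu_tier_py_spec : Claim_equal_get_cpu_tier_py := by
  intro cpu_str _
  unfold Spec_get_cpu_tier_py get_cpu_tier_py get_cpu_tier_py_alt
  by_cases h0 : cpu_str = ""
  · rw [if_pos h0, if_pos h0]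
  · rw [if_neg h0, if_neg h0]
    show aLoop (PySem.Str.lower cpu_str)
        (PySem.List.sorted (PySem.Dict.keys CPU_TIERS) PySem.Str.len true)
      = (match (List.range (PySem.Str.lower cpu_str).toList.length).foldl
            (fun b i =>
              (PySem.List.enumerate TIER_TABLE 0).foldl
                (fun b e =>
                  if PySem.Chars.startswith (List.drop i (PySem.Str.lower cpu_str).toList) e.2.1.toList
                  then better_cand b (PySem.Str.len e.2.1, e.1, e.2.2)
                  else b) b)
            (none : Option (Int × Int × Int)) with
         | some c => c.2.2
         | none => 20)
    rw [sorted_keys_eq, aLoop_eq_firstE _ SORTED_T lookups_eq,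
      bfold_eq (PySem.Str.lower cpu_str).toList]
    have hiff : ∀ e : Int × (String × Int),
        PySem.Str.isIn e.2.1 (PySem.Str.lower cpu_str)
          = PySem.Chars.isIn e.2.1.toList (PySem.Str.lower cpu_str).toList := by
      intro e; simp
    cases hfe : firstE (PySem.Str.lower cpu_str) SORTED_T with
    | none =>
        cases hmc : minCand none (candsOf (PySem.Str.lower cpu_str).toList) with
        | none => rfl
        | some c =>
            exfalso
            rcases minCand_mem _ none c hmc with h' | h'
            · cases h'
            · rcases (mem_candsOf_iff _ c).mp h' with ⟨e, heE, -, hin⟩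
              exact firstE_none _ SORTED_T hfe e (enum_sub_sorted e heE)
                (by rw [hiff e]; exact hin)
    | some a =>
        obtain ⟨haS, hain, hamin⟩ := firstE_some sorted_pairwise_cLt hfe
        have haALL : trip a ∈ candsOf (PySem.Str.lower cpu_str).toList :=
          (mem_candsOf_iff _ (trip a)).mpr
            ⟨a, sorted_sub_enum a haS, rfl, by rw [← hiff a]; exact hain⟩
        cases hmc : minCand none (candsOf (PySem.Str.lower cpu_str).toList) with
        | none =>
            obtain ⟨-, hnil⟩ := minCand_none_eq _ none hmc
            rw [hnil] at haALL; cases haALL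
        | some c =>
            rcases minCand_mem _ none c hmc with h' | h'
            · cases h'
            · rcases (mem_candsOf_iff _ c).mp h' with ⟨e, heE, rfl, hin⟩
              have heS : e ∈ SORTED_T := enum_sub_sorted e heE
              rcases hamin e heS (by rw [hiff e]; exact hin) with rfl | hlt
              · rfl
              · exact absurd hlt (minCand_min _ none (trip e) hmc (trip a) haALL)
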